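-- pv_equiv track=rewrite | github.com/SgtSteiner/AdventOfCode | 2022/day 08/solve.py | calc_tree_scenic
-- ===== SOURCE A (Python) =====
-- def calc_tree_scenic(data, row, col):
--     tree = data[row][col]
--     tree_scenic_score = 0
--
--     # verify up
--     trees = 0
--     for i in reversed(range(0, row)):
--         trees += 1
--         if data[i][col] >= tree:
--             break
--     tree_scenic_score = trees
--
--     # verify down
--     trees = 0
--     for i in range(row+1, len(data)):
--         trees += 1
--         if data[i][col] >= tree:
--             break
--     tree_scenic_score *= trees
--
--     # verify left
--     trees = 0
--     for i in reversed(range(0, col)) :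
--         trees += 1
--         if data[row][i] >= tree:
--             break
--     tree_scenic_score *= trees
--
--     # verify right
--     trees = 0
--     for i in range(col+1, len(data)) :
--         trees += 1
--         if data[row][i] >= tree:
--             break
--     tree_scenic_score *= trees
--
--     return tree_scenic_score
-- ===== SOURCE B (Python) =====
-- def calc_tree_scenic(data, row, col):
--     # Instead of four break-as-soon-as-blocked counting scans, locate the nearest
--     # blocking tree in each direction along the row/column cross (filter + max/min
--     # with the grid border as the default blocker position) and turn the four
--     # blocker positions into viewing distances arithmetically.
--     n = len(data)
--     tree = data[row][col]
--     col_blockers = [i for i in range(n) if data[i][col] >= tree]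
--     row_blockers = [i for i in range(n) if data[row][i] >= tree]
--     up_b = max([i for i in col_blockers if i < row], default=0)
--     down_b = min([i for i in col_blockers if i > row], default=n - 1)
--     left_b = max([i for i in row_blockers if i < col], default=0)
--     right_b = min([i for i in row_blockers if i > col], default=n - 1)
--     return (max(row - up_b, 0) * max(down_b - row, 0)
--             * max(col - left_b, 0) * max(right_b - col, 0))
-- ===== Notes on version B (the rewrite author's own statement) =====
-- stated objective: alternative
-- what changed: B replaces A's four count-until-blocked break loops by a nearest-blocker computation: it filters the blocker indices along the row/column cross, takes max/min with the grid border as default, and derives the four viewing distances arithmetically from the blocker positions.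
-- outside the precondition, e.g. on calc_tree_scenic([[1, 5, 2], [2, 9, 1], [3]], 0, 1): A returns 0, B raises IndexError
import Mathlib
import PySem

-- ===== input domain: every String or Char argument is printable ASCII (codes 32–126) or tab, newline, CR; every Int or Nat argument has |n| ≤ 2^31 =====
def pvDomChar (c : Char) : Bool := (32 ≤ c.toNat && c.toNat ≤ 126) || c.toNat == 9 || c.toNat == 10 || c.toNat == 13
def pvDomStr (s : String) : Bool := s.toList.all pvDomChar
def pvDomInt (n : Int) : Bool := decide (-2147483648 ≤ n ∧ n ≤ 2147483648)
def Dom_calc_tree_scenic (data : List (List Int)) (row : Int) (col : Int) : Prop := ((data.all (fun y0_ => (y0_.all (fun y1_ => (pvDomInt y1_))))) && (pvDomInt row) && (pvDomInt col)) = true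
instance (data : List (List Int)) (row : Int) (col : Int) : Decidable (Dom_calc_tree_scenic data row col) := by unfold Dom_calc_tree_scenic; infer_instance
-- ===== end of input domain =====

-- B replaces A's four count-until-blocked break loops by a nearest-blocker computation
-- (filter the blocker indices on the cross, max/min with the border as default, then
-- derive the distances arithmetically); same cost, same results on the stated domain.

-- ===== PORT A =====

-- data[r][c] (only evaluated at in-range indices under Pre_)
def pvAt (data : List (List Int)) (r c : Int) : Int :=
  PySem.List.pyGetD (PySem.List.pyGetD data r []) c 0

-- 'trees = 0; for i in idxs: trees += 1; if g i >= tree: break'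
def pvScan (g : Int → Int) (tree : Int) : List Int → Int
  | [] => 0
  | i :: rest => if g i ≥ tree then 1 else 1 + pvScan g tree rest

def calc_tree_scenic (data : List (List Int)) (row : Int) (col : Int) : Int :=
  let tree := pvAt data row col
  let n : Int := data.length
  let up := pvScan (fun i => pvAt data i col) tree (PySem.List.pyRange 0 row 1).reverse
  let down := pvScan (fun i => pvAt data i col) tree (PySem.List.pyRange (row + 1) n 1)
  let left := pvScan (fun i => pvAt data row i) tree (PySem.List.pyRange 0 col 1).reverse
  let right := pvScan (fun i => pvAt data row i) tree (PySem.List.pyRange (col + 1) n 1)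
  up * down * left * right

-- ===== PORT B =====

def calc_tree_scenic_alt (data : List (List Int)) (row : Int) (col : Int) : Int :=
  let n : Int := data.length
  let tree := pvAt data row col
  let colB := (PySem.List.pyRange 0 n 1).filter (fun i => decide (pvAt data i col ≥ tree))
  let rowB := (PySem.List.pyRange 0 n 1).filter (fun i => decide (pvAt data row i ≥ tree))
  let upB := PySem.List.maxD (colB.filter (fun i => decide (i < row))) (fun y => y) 0
  let downB := PySem.List.minD (colB.filter (fun i => decide (i > row))) (fun y => y) (n - 1)
  let leftB := PySem.List.maxD (rowB.filter (fun i => decide (i < col))) (fun y => y) 0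
  let rightB := PySem.List.minD (rowB.filter (fun i => decide (i > col))) (fun y => y) (n - 1)
  max (row - upB) 0 * max (downB - row) 0 * max (col - leftB) 0 * max (rightB - col) 0

-- ===== PRECONDITION & SPEC =====
-- Pre_ is a closed-form safety domain: both indices are valid Python indices (negative
-- wraparound allowed), every row is long enough for col, and the selected row spans the
-- horizontal scans.  Outside it A raises IndexError on some scanned cell, except on a few
-- break-saved ragged grids where A still returns 0 while B's full cross pass raises, so
-- they stay excluded.
def Pre_calc_tree_scenic (data : List (List Int)) (row : Int) (col : Int) : Prop :=
  -(data.length : Int) ≤ row ∧ row < data.length ∧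
  -(data.length : Int) ≤ col ∧ col < data.length ∧
  (∀ r ∈ data, -(r.length : Int) ≤ col ∧ col < r.length) ∧
  (data.length : Int) ≤ ((PySem.List.pyGetD data row ([] : List Int)).length : Int)

instance (data : List (List Int)) (row : Int) (col : Int) : Decidable (Pre_calc_tree_scenic data row col) := by
  unfold Pre_calc_tree_scenic; infer_instance

def pvWitness_calc_tree_scenic : List (List Int) × Int × Int :=
  ([[3, 0, 3], [2, 5, 1], [6, 3, 2]], 1, 1)

def Spec_calc_tree_scenic (data : List (List Int)) (row : Int) (col : Int) (out : Int) : Prop := out = calc_tree_scenic_alt data row col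
instance (data : List (List Int)) (row : Int) (col : Int) (out : Int) : Decidable (Spec_calc_tree_scenic data row col out) := by unfold Spec_calc_tree_scenic; infer_instance

-- ===== CLAIM (what is proved, stated in full; the proofs are below) =====
def Claim_equal_calc_tree_scenic : Prop := ∀ (data : List (List Int)) (row : Int) (col : Int), Dom_calc_tree_scenic data row col → Pre_calc_tree_scenic data row col → Spec_calc_tree_scenic data row col (calc_tree_scenic data row col)

-- ===== LEMMAS AND PROOFS =====

-- greatest blocker index < m (default 0): the value B's 'max(filter, default=0)' computes
def mbUp (g : Int → Int) (t : Int) : Nat → Int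
  | 0 => 0
  | m + 1 => if g m ≥ t then (m : Int) else mbUp g t m

-- least blocker index in (r, r+k] (default r, so r+k when counted from the far end)
def nbDown (g : Int → Int) (t : Int) : Int → Nat → Int
  | r, 0 => r
  | r, k + 1 => if g (r + 1) ≥ t then r + 1 else nbDown g t (r + 1) k

theorem mbUp_bounds (g : Int → Int) (t : Int) (m : Nat) :
    0 ≤ mbUp g t m ∧ mbUp g t m ≤ m := by
  induction m with
  | zero => simp [mbUp]
  | succ m ih => unfold mbUp; split_ifs <;> omega

theorem nbDown_bounds (g : Int → Int) (t : Int) (k : Nat) :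
    ∀ r : Int, r ≤ nbDown g t r k ∧ nbDown g t r k ≤ r + k := by
  induction k with
  | zero => intro r; simp [nbDown]
  | succ k ih =>
    intro r; unfold nbDown
    have := ih (r + 1)
    split_ifs <;> push_cast <;> omega

-- max over a list all of whose elements are below the appended one
theorem max?_append_singleton (l : List Int) (a : Int) (h : ∀ x ∈ l, x < a) :
    PySem.List.max? (l ++ [a]) (fun y => y) = some a := by
  rcases hm : PySem.List.max? l (fun y => y) with _ | m
  · unfold PySem.List.max? at hm ⊢
    rw [List.foldl_append, hm]
    rfl
  · have hmem : m ∈ l := PySem.List.max?_mem hm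
    unfold PySem.List.max? at hm ⊢
    rw [List.foldl_append, hm]
    simp [h m hmem]

-- min of a cons whose head is below the tail
theorem min?_cons_of_lt (m : Int) (l : List Int) (h : ∀ x ∈ l, m < x) :
    PySem.List.min? (m :: l) (fun y => y) = some m := by
  unfold PySem.List.min?
  simp only [List.foldl_cons]
  induction l with
  | nil => simp
  | cons x xs ih =>
    have hx := h x (by simp)
    simp only [List.foldl_cons]
    rw [if_neg (by omega)]
    exact ih (fun y hy => h y (by simp [hy]))

-- A's upward scan counts down to the greatest blocker below
theorem scan_up (g : Int → Int) (t : Int) (m : Nat) :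
    pvScan g t (PySem.List.pyRange 0 (m : Int) 1).reverse = (m : Int) - mbUp g t m := by
  induction m with
  | zero =>
    rw [PySem.List.pyRange_one_eq_nil (by omega)]
    simp [pvScan, mbUp]
  | succ m ih =>
    push_cast
    rw [PySem.List.pyRange_one_succ_right (by omega)]
    simp only [List.reverse_append, List.reverse_singleton, List.singleton_append, pvScan]
    unfold mbUp
    split_ifs with h
    · ring
    · rw [ih]; ring

-- B's 'max(blockers below, default=0)' computes the same greatest blocker
theorem filt_up (g : Int → Int) (t : Int) (m : Nat) :
    PySem.List.maxD ((PySem.List.pyRange 0 (m : Int) 1).filter (fun i => decide (g i ≥ t)))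
      (fun y => y) 0 = mbUp g t m := by
  induction m with
  | zero =>
    rw [PySem.List.pyRange_one_eq_nil (by omega)]
    simp [PySem.List.maxD, PySem.List.max?, mbUp]
  | succ m ih =>
    push_cast
    rw [PySem.List.pyRange_one_succ_right (by omega), List.filter_append]
    unfold mbUp
    split_ifs with h
    · have hf : List.filter (fun i => decide (g i ≥ t)) [(m : Int)] = [(m : Int)] := by simp [h]
      rw [hf]
      unfold PySem.List.maxD
      rw [max?_append_singleton _ _ (by
        intro x hx
        have := (PySem.List.mem_pyRange_one).1 (List.mem_of_mem_filter hx)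
        omega)]
      rfl
    · have hf : List.filter (fun i => decide (g i ≥ t)) [(m : Int)] = [] := by simp [h]
      rw [hf, List.append_nil]
      exact ih

-- A's downward scan counts up to the least blocker above
theorem scan_down (g : Int → Int) (t : Int) (k : Nat) :
    ∀ r : Int, pvScan g t (PySem.List.pyRange (r + 1) (r + 1 + (k : Int)) 1)
      = nbDown g t r k - r := by
  induction k with
  | zero =>
    intro r
    rw [PySem.List.pyRange_one_eq_nil (by omega)]
    simp [pvScan, nbDown]
  | succ k ih =>
    intro r
    push_cast
    rw [PySem.List.pyRange_one_cons (by omega)]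
    simp only [pvScan]
    unfold nbDown
    split_ifs with h
    · ring
    · rw [show r + 1 + ((k : Int) + 1) = (r + 1) + 1 + (k : Int) by ring, ih (r + 1)]
      ring

-- B's 'min(blockers above, default=border)' computes the same least blocker
theorem filt_down (g : Int → Int) (t : Int) (k : Nat) :
    ∀ r : Int,
      PySem.List.minD ((PySem.List.pyRange (r + 1) (r + 1 + (k : Int)) 1).filter
          (fun i => decide (g i ≥ t))) (fun y => y) (r + (k : Int))
        = nbDown g t r k := by
  induction k with
  | zero =>
    intro r
    rw [PySem.List.pyRange_one_eq_nil (by omega)]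
    simp [PySem.List.minD, PySem.List.min?, nbDown]
  | succ k ih =>
    intro r
    push_cast
    rw [PySem.List.pyRange_one_cons (by omega)]
    unfold nbDown
    split_ifs with h
    · simp only [List.filter_cons, h, decide_true, if_true]
      unfold PySem.List.minD
      rw [min?_cons_of_lt _ _ (by
        intro x hx
        have := (PySem.List.mem_pyRange_one).1 (List.mem_of_mem_filter hx)
        omega)]
      rfl
    · simp only [List.filter_cons, h, decide_false]
      rw [show r + 1 + ((k : Int) + 1) = (r + 1) + 1 + (k : Int) by ring,
          show r + ((k : Int) + 1) = (r + 1) + (k : Int) by ring]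
      exact ih (r + 1)

-- restrict the full cross to one side of the tree: below
theorem filter_lt_split (p : Int → Bool) (n q : Int) (h0 : 0 ≤ q) (hn : q ≤ n) :
    ((PySem.List.pyRange 0 n 1).filter p).filter (fun i => decide (i < q))
      = (PySem.List.pyRange 0 q 1).filter p := by
  rw [List.filter_filter, PySem.List.pyRange_one_append 0 q n h0 hn, List.filter_append]
  have h1 : (PySem.List.pyRange 0 q 1).filter (fun i => decide (i < q) && p i)
      = (PySem.List.pyRange 0 q 1).filter p := by
    apply List.filter_congr
    intro x hx
    have := (PySem.List.mem_pyRange_one).1 hx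
    simp [show x < q by omega]
  have h2 : (PySem.List.pyRange q n 1).filter (fun i => decide (i < q) && p i) = [] := by
    rw [List.filter_eq_nil_iff]
    intro x hx
    have := (PySem.List.mem_pyRange_one).1 hx
    simp [show ¬ x < q by omega]
  rw [h1, h2, List.append_nil]

-- restrict the full cross to one side of the tree: above
theorem filter_gt_split (p : Int → Bool) (n q : Int) (h0 : 0 ≤ q) (hn : q < n) :
    ((PySem.List.pyRange 0 n 1).filter p).filter (fun i => decide (i > q))
      = (PySem.List.pyRange (q + 1) n 1).filter p := by
  rw [List.filter_filter, PySem.List.pyRange_one_append 0 (q + 1) n (by omega) (by omega),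
      List.filter_append]
  have h1 : (PySem.List.pyRange 0 (q + 1) 1).filter (fun i => decide (i > q) && p i) = [] := by
    rw [List.filter_eq_nil_iff]
    intro x hx
    have := (PySem.List.mem_pyRange_one).1 hx
    simp [show ¬ x > q by omega]
  have h2 : (PySem.List.pyRange (q + 1) n 1).filter (fun i => decide (i > q) && p i)
      = (PySem.List.pyRange (q + 1) n 1).filter p := by
    apply List.filter_congr
    intro x hx
    have := (PySem.List.mem_pyRange_one).1 hx
    simp [show x > q by omega]
  rw [h1, h2, List.nil_append]

-- a negative index leaves no blockers below it: the 'below' filter is empty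
theorem filter_lt_neg (p : Int → Bool) (n q : Int) (h : q < 0) :
    ((PySem.List.pyRange 0 n 1).filter p).filter (fun i => decide (i < q)) = [] := by
  rw [List.filter_eq_nil_iff]
  intro x hx
  have := (PySem.List.mem_pyRange_one).1 (List.mem_of_mem_filter hx)
  simp [show ¬ x < q by omega]

-- ===== VERDICT (by name: the statement is the Claim_ definition above) =====
theorem calc_tree_scenic_spec : Claim_equal_calc_tree_scenic := by
  intro data row col _ hpre
  obtain ⟨hrl, hrn, hcl, hcn, _, hrowlen⟩ := hpre
  unfold Spec_calc_tree_scenic calc_tree_scenic calc_tree_scenic_alt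
  dsimp only
  by_cases hrow : 0 ≤ row
  case neg =>
    -- row < 0: A's upward range is empty (factor 0) and B's 'blockers below row'
    -- filter is empty, so its first factor is max(row, 0) = 0
    rw [PySem.List.pyRange_one_eq_nil (show row ≤ 0 by omega),
        filter_lt_neg (fun i => decide (pvAt data i col ≥ pvAt data row col))
          (data.length : Int) row (by omega)]
    simp only [List.reverse_nil, pvScan, PySem.List.maxD, PySem.List.max?, List.foldl_nil,
      Option.getD_none]
    rw [show max (row - 0) 0 = 0 by omega]
    ring
  by_cases hcol : 0 ≤ col
  case neg =>
    -- col < 0: same with the leftward factors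
    rw [PySem.List.pyRange_one_eq_nil (show col ≤ 0 by omega),
        filter_lt_neg (fun i => decide (pvAt data row i ≥ pvAt data row col))
          (data.length : Int) col (by omega)]
    simp only [List.reverse_nil, pvScan, PySem.List.maxD, PySem.List.max?, List.foldl_nil,
      Option.getD_none]
    rw [show max (col - 0) 0 = 0 by omega]
    ring
  -- main case: 0 ≤ row < n, 0 ≤ col < n
  have hup := scan_up (fun i => pvAt data i col) (pvAt data row col) row.toNat
  have hupB := filt_up (fun i => pvAt data i col) (pvAt data row col) row.toNat
  have hdn := scan_down (fun i => pvAt data i col) (pvAt data row col)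
    ((data.length : Int) - (row + 1)).toNat row
  have hdnB := filt_down (fun i => pvAt data i col) (pvAt data row col)
    ((data.length : Int) - (row + 1)).toNat row
  have hlf := scan_up (fun i => pvAt data row i) (pvAt data row col) col.toNat
  have hlfB := filt_up (fun i => pvAt data row i) (pvAt data row col) col.toNat
  have hrt := scan_down (fun i => pvAt data row i) (pvAt data row col)
    ((data.length : Int) - (col + 1)).toNat col
  have hrtB := filt_down (fun i => pvAt data row i) (pvAt data row col)
    ((data.length : Int) - (col + 1)).toNat col
  rw [show ((row.toNat : Int)) = row by omega] at hup hupB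
  rw [show ((col.toNat : Int)) = col by omega] at hlf hlfB
  rw [show row + 1 + ((((data.length : Int) - (row + 1)).toNat : Int)) = (data.length : Int)
    by omega] at hdn hdnB
  rw [show row + ((((data.length : Int) - (row + 1)).toNat : Int)) = (data.length : Int) - 1
    by omega] at hdnB
  rw [show col + 1 + ((((data.length : Int) - (col + 1)).toNat : Int)) = (data.length : Int)
    by omega] at hrt hrtB
  rw [show col + ((((data.length : Int) - (col + 1)).toNat : Int)) = (data.length : Int) - 1
    by omega] at hrtB
  rw [hup, hdn, hlf, hrt,
      filter_lt_split _ _ _ hrow (by omega), hupB,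
      filter_gt_split _ _ _ hrow (by omega), hdnB,
      filter_lt_split _ _ _ hcol (by omega), hlfB,
      filter_gt_split _ _ _ hcol (by omega), hrtB]
  have h1 := mbUp_bounds (fun i => pvAt data i col) (pvAt data row col) row.toNat
  have h2 := nbDown_bounds (fun i => pvAt data i col) (pvAt data row col)
    ((data.length : Int) - (row + 1)).toNat row
  have h3 := mbUp_bounds (fun i => pvAt data row i) (pvAt data row col) col.toNat
  have h4 := nbDown_bounds (fun i => pvAt data row i) (pvAt data row col)
    ((data.length : Int) - (col + 1)).toNat col
  rw [show max (row - mbUp (fun i => pvAt data i col) (pvAt data row col) row.toNat) 0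
        = row - mbUp (fun i => pvAt data i col) (pvAt data row col) row.toNat by omega,
      show max (nbDown (fun i => pvAt data i col) (pvAt data row col) row
          ((data.length : Int) - (row + 1)).toNat - row) 0
        = nbDown (fun i => pvAt data i col) (pvAt data row col) row
          ((data.length : Int) - (row + 1)).toNat - row by omega,
      show max (col - mbUp (fun i => pvAt data row i) (pvAt data row col) col.toNat) 0
        = col - mbUp (fun i => pvAt data row i) (pvAt data row col) col.toNat by omega,
      show max (nbDown (fun i => pvAt data row i) (pvAt data row col) col
          ((data.length : Int) - (col + 1)).toNat - col) 0
        = nbDown (fun i => pvAt data row i) (pvAt data row col) col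
          ((data.length : Int) - (col + 1)).toNat - col by omega]
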